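-- pv_equiv track=rewrite | github.com/RanferyPeregrina/Semestre-EneJun2026 | Teoría de la información/Tarea 2/Canales.py | Generar_Mensajes
-- ===== SOURCE A (Python) =====
-- def Generar_Mensajes(Alfabeto, L):
--
--     mensajes = []
--
--     def construir(actual, longitud_actual):
--
--         # Si ya llegamos exactamente a L → guardamos
--         if longitud_actual == L:
--             mensajes.append(actual)
--             return
--
--         # Si nos pasamos → cancelamos este camino
--         if longitud_actual > L:
--             return
--
--         # Intentamos agregar cada símbolo
--         for simbolo in Alfabeto:
--             nueva_longitud = longitud_actual + len(simbolo)
--             construir(actual + simbolo, nueva_longitud)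
--
--     # Empezamos desde vacío
--     construir("", 0)
--
--     return mensajes
-- ===== SOURCE B (Python) =====
-- def Generar_Mensajes(Alfabeto, L):
--     if L < 0:
--         return []
--     # dynamic programming over the remaining length: suf[r] lists, in the
--     # DFS visiting order, all messages of total length exactly r
--     suf = [[""]]
--     for r in range(1, L + 1):
--         suf.append([s + t for s in Alfabeto if 0 < len(s) <= r for t in suf[r - len(s)]])
--     return suf[L]
-- ===== Notes on version B (the rewrite author's own statement) =====
-- stated objective: alternative
-- what changed: Replaces A's recursive depth-first search (building each message prefix top-down) with a bottom-up dynamic-programming table suf[r] listing, in DFS order, all messages of remaining length exactly r, then returns suf[L].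
import Mathlib
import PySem

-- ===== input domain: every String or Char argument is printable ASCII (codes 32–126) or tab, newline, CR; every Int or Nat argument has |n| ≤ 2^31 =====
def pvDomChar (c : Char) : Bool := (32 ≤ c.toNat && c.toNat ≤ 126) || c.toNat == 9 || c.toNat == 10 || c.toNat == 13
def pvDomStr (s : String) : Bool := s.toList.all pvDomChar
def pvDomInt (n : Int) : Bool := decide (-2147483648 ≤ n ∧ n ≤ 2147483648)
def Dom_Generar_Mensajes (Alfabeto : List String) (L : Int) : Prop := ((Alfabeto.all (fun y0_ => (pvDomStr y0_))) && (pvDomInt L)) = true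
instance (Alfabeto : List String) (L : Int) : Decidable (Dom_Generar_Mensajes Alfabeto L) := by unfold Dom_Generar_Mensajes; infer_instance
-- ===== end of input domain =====

-- B replaces A's recursive depth-first search by a bottom-up dynamic-programming table over the
-- remaining length (objective: alternative decomposition; equal asymptotic cost, no speed claim).

-- ===== PORT A =====
-- A's inner recursion `construir`, fuel-guarded only to make it total in Lean: on every input
-- admitted by Pre_ the recursion depth is below the fuel, so the guard never fires.
def construirA (Alfabeto : List String) (L : Int) : Nat → String → Int → List String → List String
  | 0, _, _, mensajes => mensajes
  | fuel+1, actual, longitud_actual, mensajes =>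
    if longitud_actual = L then mensajes ++ [actual]
    else if longitud_actual > L then mensajes
    else Alfabeto.foldl
      (fun msgs simbolo =>
        construirA Alfabeto L fuel (actual ++ simbolo) (longitud_actual + PySem.Str.len simbolo) msgs)
      mensajes

def Generar_Mensajes (Alfabeto : List String) (L : Int) : List String :=
  construirA Alfabeto L (L.toNat + 1) "" 0 []

-- ===== PORT B =====
def Generar_Mensajes_alt (Alfabeto : List String) (L : Int) : List String :=
  if L < 0 then []
  else
    let suf := (PySem.List.pyRange 1 (L + 1) 1).foldl
      (fun suf r =>
        suf ++ [Alfabeto.flatMap (fun s =>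
          if 0 < PySem.Str.len s ∧ PySem.Str.len s ≤ r then
            (PySem.List.pyGetD suf (r - PySem.Str.len s) ([] : List String)).map (fun t => s ++ t)
          else [])])
      [[""]]
    PySem.List.pyGetD suf L []

-- ===== PRECONDITION & SPEC =====
-- Pre_ excludes alphabets containing the empty string together with L > 0: there A recurses
-- forever on the zero-length symbol and raises RecursionError (it never returns).
def Pre_Generar_Mensajes (Alfabeto : List String) (L : Int) : Prop :=
  L ≤ 0 ∨ "" ∉ Alfabeto
instance (Alfabeto : List String) (L : Int) : Decidable (Pre_Generar_Mensajes Alfabeto L) := by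
  unfold Pre_Generar_Mensajes; infer_instance
def pvWitness_Generar_Mensajes : List String × Int := (["a", "b"], 2)

def Spec_Generar_Mensajes (Alfabeto : List String) (L : Int) (out : List String) : Prop :=
  out = Generar_Mensajes_alt Alfabeto L
instance (Alfabeto : List String) (L : Int) (out : List String) : Decidable (Spec_Generar_Mensajes Alfabeto L out) := by
  unfold Spec_Generar_Mensajes; infer_instance

-- ===== CLAIM (what is proved, stated in full; the proofs are below) =====
def Claim_equal_Generar_Mensajes : Prop := ∀ (Alfabeto : List String) (L : Int), Dom_Generar_Mensajes Alfabeto L → Pre_Generar_Mensajes Alfabeto L → Spec_Generar_Mensajes Alfabeto L (Generar_Mensajes Alfabeto L)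

-- ===== LEMMAS AND PROOFS =====

-- the list of all messages of total length exactly r, in A's DFS visiting order
def gSuf (Alfabeto : List String) : Nat → List String
  | 0 => [""]
  | (r+1) => Alfabeto.flatMap (fun s =>
      if _h : 0 < s.toList.length ∧ s.toList.length ≤ r + 1 then
        (gSuf Alfabeto (r + 1 - s.toList.length)).map (fun t => s ++ t)
      else [])
  termination_by r => r
  decreasing_by omega

lemma toList_len_pos_of_ne_empty {s : String} (h : s ≠ "") : 0 < s.toList.length := by
  rcases Nat.eq_zero_or_pos s.toList.length with h0 | h0
  · exact absurd (by
      simpa using congrArg String.ofList (List.length_eq_zero_iff.mp h0)) h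
  · exact h0

lemma gSuf_eq_flatMap (Alfabeto : List String) (r : Nat)
    (hA : ∀ s ∈ Alfabeto, s ≠ "") :
    gSuf Alfabeto (r + 1) = Alfabeto.flatMap (fun s =>
      if s.toList.length ≤ r + 1 then
        (gSuf Alfabeto (r + 1 - s.toList.length)).map (fun t => s ++ t)
      else []) := by
  rw [gSuf]
  refine List.flatMap_congr (fun s hs => ?_)
  have ha := toList_len_pos_of_ne_empty (hA s hs)
  by_cases h2 : s.toList.length ≤ r + 1
  · rw [dif_pos ⟨ha, h2⟩, if_pos h2]
  · rw [dif_neg (by omega), if_neg h2]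

lemma construirA_eq (Alfabeto : List String) (L : Int)
    (hA : ∀ s ∈ Alfabeto, s ≠ "") :
    ∀ (fuel : Nat) (actual : String) (lon : Int) (mensajes : List String),
      lon ≤ L → (L - lon).toNat < fuel →
      construirA Alfabeto L fuel actual lon mensajes
        = mensajes ++ (gSuf Alfabeto (L - lon).toNat).map (fun t => actual ++ t) := by
  intro fuel
  induction fuel with
  | zero => intro _ _ _ _ h; omega
  | succ fuel ih =>
    intro actual lon mensajes hle hfuel
    rw [construirA]
    by_cases heq : lon = L
    · subst heq
      simp [gSuf]
    · have hlt : lon < L := lt_of_le_of_ne hle heq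
      rw [if_neg heq, if_neg (by omega)]
      set r := (L - lon).toNat with hr
      have hr1 : 1 ≤ r := by omega
      obtain ⟨rr, hrr⟩ : ∃ rr, r = rr + 1 := ⟨r - 1, by omega⟩
      -- the fold over the alphabet builds exactly the flatMap
      have haux : ∀ (l : List String), (∀ s ∈ l, s ≠ "") → ∀ (msgs : List String),
          l.foldl (fun msgs simbolo =>
              construirA Alfabeto L fuel (actual ++ simbolo)
                (lon + PySem.Str.len simbolo) msgs) msgs
          = msgs ++ (l.flatMap (fun s =>
              if s.toList.length ≤ r then
                (gSuf Alfabeto (r - s.toList.length)).map (fun t => s ++ t)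
              else [])).map (fun t => actual ++ t) := by
        intro l hl
        induction l with
        | nil => intro msgs; simp
        | cons a tl ihl =>
          intro msgs
          have ha : a ≠ "" := hl a (by simp)
          have hapos : 0 < a.toList.length := toList_len_pos_of_ne_empty ha
          have hlen : PySem.Str.len a = (a.toList.length : Int) := by simp
          rw [List.foldl_cons, ihl (fun s hs => hl s (by simp [hs]))]
          by_cases hca : a.toList.length ≤ r
          · have hca' : a.length ≤ r := by simpa using hca
            have hlon' : lon + PySem.Str.len a ≤ L := by rw [hlen]; omega
            have hnat : (L - (lon + PySem.Str.len a)).toNat = r - a.toList.length := by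
              rw [hlen]; omega
            rw [ih (actual ++ a) (lon + PySem.Str.len a) msgs hlon' (by rw [hnat]; omega)]
            rw [hnat]
            simp [hca', List.map_map, List.append_assoc, Function.comp_def, String.append_assoc]
          · -- the child overshoots L and returns msgs unchanged
            have hgt : lon + PySem.Str.len a > L := by rw [hlen]; omega
            obtain ⟨f, hf⟩ : ∃ f, fuel = f + 1 := ⟨fuel - 1, by omega⟩
            have hchild : construirA Alfabeto L fuel (actual ++ a)
                (lon + PySem.Str.len a) msgs = msgs := by
              rw [hf, construirA, if_neg (by omega), if_pos hgt]
            rw [hchild, List.flatMap_cons, if_neg hca]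
            simp
      rw [haux Alfabeto hA mensajes, hrr, gSuf_eq_flatMap Alfabeto rr hA, ← hrr]

lemma table_eq (Alfabeto : List String) (n : Nat) :
    (PySem.List.pyRange 1 ((n : Int) + 1) 1).foldl
      (fun suf r =>
        suf ++ [Alfabeto.flatMap (fun s =>
          if 0 < PySem.Str.len s ∧ PySem.Str.len s ≤ r then
            (PySem.List.pyGetD suf (r - PySem.Str.len s) ([] : List String)).map (fun t => s ++ t)
          else [])])
      [[""]]
    = (List.range (n + 1)).map (gSuf Alfabeto) := by
  induction n with
  | zero =>
    rw [PySem.List.pyRange_one_eq_nil (by norm_num)]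
    simp [gSuf]
  | succ n ih =>
    have hsplit : PySem.List.pyRange 1 ((↑(n + 1) : Int) + 1) 1
        = PySem.List.pyRange 1 ((n : Int) + 1) 1 ++ [((n : Int) + 1)] := by
      have := PySem.List.pyRange_one_succ_right (a := 1) (b := (n : Int) + 1) (by omega)
      push_cast
      rw [this]
    rw [hsplit, List.foldl_append, ih]
    simp only [List.foldl_cons, List.foldl_nil]
    rw [List.range_succ (n := n + 1), List.map_append, List.map_singleton]
    congr 1
    rw [gSuf]
    congr 1
    refine List.flatMap_congr (fun s _ => ?_)
    have hlen : PySem.Str.len s = (s.toList.length : Int) := by simp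
    by_cases h : 0 < s.toList.length ∧ s.toList.length ≤ n + 1
    · rw [dif_pos h, if_pos (by rw [hlen]; omega)]
      have hcast : (n : Int) + 1 - PySem.Str.len s = ((n + 1 - s.toList.length : Nat) : Int) := by
        rw [hlen]; omega
      rw [hcast, PySem.List.pyGetD_natCast]
      congr 1
      rw [List.getD_eq_getElem?_getD]
      rw [List.getElem?_map, List.getElem?_range (by omega)]
      simp
    · rw [dif_neg h, if_neg (by rw [hlen]; omega)]

lemma alt_eq_gSuf (Alfabeto : List String) (L : Int) (hL : 0 ≤ L) :
    Generar_Mensajes_alt Alfabeto L = gSuf Alfabeto L.toNat := by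
  rw [Generar_Mensajes_alt, if_neg (by omega)]
  have hn : L = (L.toNat : Int) := by omega
  rw [hn]
  rw [table_eq Alfabeto L.toNat]
  rw [PySem.List.pyGetD_natCast]
  rw [List.getD_eq_getElem?_getD, List.getElem?_map, List.getElem?_range (by omega)]
  simp
  congr 1
  omega

-- ===== VERDICT (by name: the statement is the Claim_ definition above) =====
theorem Generar_Mensajes_spec : Claim_equal_Generar_Mensajes := by
  intro Alfabeto L _hDom hPre
  unfold Spec_Generar_Mensajes Generar_Mensajes
  by_cases hneg : L < 0
  · rw [construirA, if_neg (by omega), if_pos (by omega)]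
    rw [Generar_Mensajes_alt, if_pos hneg]
  · have hL : 0 ≤ L := by omega
    rw [alt_eq_gSuf Alfabeto L hL]
    by_cases h0 : L = 0
    · subst h0
      rw [construirA, if_pos rfl]
      simp [gSuf]
    · have hA : ∀ s ∈ Alfabeto, s ≠ "" := by
        rcases hPre with h | h
        · exact absurd h (by omega)
        · intro s hs hse; exact h (hse ▸ hs)
      rw [construirA_eq Alfabeto L hA (L.toNat + 1) "" 0 [] hL (by omega)]
      simp
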